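-- pv_equiv track=rewrite | github.com/SeolJaeHyeok/TIL | Algorithm/programmers/Level1/모의고사.py | solution
-- ===== SOURCE A (Python) =====
-- from collections import deque
--
-- def solution(answers):
--     a = deque([1, 2, 3, 4, 5])
--     b = deque([2, 1, 2, 3, 2, 4, 2, 5])
--     c = deque([3, 3, 1, 1, 2, 2, 4, 4, 5, 5])
--
--     score = [[1, 0], [2, 0], [3, 0]]
--     for answer in answers:
--         if a[0] == answer:
--             score[0][1] += 1
--         if b[0] == answer:
--             score[1][1] += 1
--         if c[0] == answer:
--             score[2][1] += 1
--
--         a.append(a.popleft())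
--         b.append(b.popleft())
--         c.append(c.popleft())
--
--     score.sort(key=lambda x: x[1], reverse=True)
--
--     answer = []
--     max_score = score[0][1]
--     answer.append(score[0][0])
--     for i in range(1, len(score)):
--         if score[i][1] == max_score:
--             answer.append(score[i][0])
--         else:
--             break
--
--     return answer
-- ===== SOURCE B (Python) =====
-- def solution(answers):
--     # One counting pass: histogram answers by (position mod 40, value); 40 = lcm(5, 8, 10),
--     # the common period of the three students' cycles. Then each student's score is a fixed
--     # 40-term table lookup, and a running max picks the winners without sorting.
--     freq = {}
--     for i, ans in enumerate(answers):
--         key = (i % 40, ans)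
--         freq[key] = freq.get(key, 0) + 1
--     patterns = [[1, 2, 3, 4, 5],
--                 [2, 1, 2, 3, 2, 4, 2, 5],
--                 [3, 3, 1, 1, 2, 2, 4, 4, 5, 5]]
--     best = -1
--     winners = []
--     for person, pat in enumerate(patterns, 1):
--         s = sum(freq.get((j, pat[j % len(pat)]), 0) for j in range(40))
--         if s > best:
--             best = s
--             winners = [person]
--         elif s == best:
--             winners.append(person)
--     return winners
-- ===== Notes on version B (the rewrite author's own statement) =====
-- stated objective: alternative
-- what changed: Instead of A's single pass that compares each answer with the fronts of three mutating deques and then sorts the score table, B makes one counting pass that histograms answers by (index mod 40, value) into a dict (40 = lcm of the three cycle lengths), computes each student's score as a 40-term table lookup, and selects winners with a running max, with no sort and no per-answer pattern comparison.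
import Mathlib
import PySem

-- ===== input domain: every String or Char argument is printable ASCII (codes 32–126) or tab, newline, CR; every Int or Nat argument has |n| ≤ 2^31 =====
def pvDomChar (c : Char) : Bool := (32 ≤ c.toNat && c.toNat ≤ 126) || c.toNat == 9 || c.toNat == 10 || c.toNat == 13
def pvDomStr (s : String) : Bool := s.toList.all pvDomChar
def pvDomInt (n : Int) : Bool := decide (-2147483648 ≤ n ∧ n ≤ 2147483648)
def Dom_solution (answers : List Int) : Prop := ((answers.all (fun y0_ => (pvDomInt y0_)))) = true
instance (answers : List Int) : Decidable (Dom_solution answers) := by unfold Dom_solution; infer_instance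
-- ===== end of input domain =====

-- B replaces A's compare-and-rotate pass plus sort with one (index mod 40, value)
-- histogram pass, per-student 40-term table lookups, and a running-max selection
-- (objective: alternative).

-- ===== PORT A =====
-- A's loop: for each answer, compare the front of each deque, count, and rotate each deque.
-- Python's a[0] on the (always nonempty) deque is ported as headD 0 (exact since the
-- rotated pattern lists are never empty); append(popleft()) is tail ++ [headD 0].
def solutionLoop (a b c : List Int) (s1 s2 s3 : Int) : List Int → Int × Int × Int
  | [] => (s1, s2, s3)
  | ans :: rest =>
      solutionLoop (a.tail ++ [a.headD 0]) (b.tail ++ [b.headD 0]) (c.tail ++ [c.headD 0])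
        (if a.headD 0 = ans then s1 + 1 else s1)
        (if b.headD 0 = ans then s2 + 1 else s2)
        (if c.headD 0 = ans then s3 + 1 else s3) rest

-- the post-sort collection loop: append while the score equals max_score, break otherwise
def solutionCollect (score : List (Int × Int)) (maxScore : Int) : List Int → List Int
  | [] => []
  | i :: rest =>
      if (PySem.List.pyGetD score i (0, 0)).2 = maxScore then
        (PySem.List.pyGetD score i (0, 0)).1 :: solutionCollect score maxScore rest
      else []

def solution (answers : List Int) : List Int :=
  let r := solutionLoop [1, 2, 3, 4, 5] [2, 1, 2, 3, 2, 4, 2, 5] [3, 3, 1, 1, 2, 2, 4, 4, 5, 5]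
             0 0 0 answers
  let score : List (Int × Int) := [(1, r.1), (2, r.2.1), (3, r.2.2)]
  let score := PySem.List.sorted score (fun x => x.2) true
  let maxScore := (PySem.List.pyGetD score 0 (0, 0)).2
  (PySem.List.pyGetD score 0 (0, 0)).1 ::
    solutionCollect score maxScore (PySem.List.pyRange 1 (score.length : Int) 1)

-- ===== PORT B =====
-- first loop of Source B: freq[(i % 40, ans)] = freq.get((i % 40, ans), 0) + 1
def buildFreq (answers : List Int) : PySem.Dict (Int × Int) Int :=
  (PySem.List.enumerate answers 0).foldl
    (fun d p =>
      d.insert (PySem.Int.mod p.1 40, p.2)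
        (d.getD (PySem.Int.mod p.1 40, p.2) 0 + 1))
    PySem.Dict.empty

-- s = sum(freq.get((j, pat[j % len(pat)]), 0) for j in range(40))
def scoreFromFreq (freq : PySem.Dict (Int × Int) Int) (pat : List Int) : Int :=
  ((PySem.List.pyRange 0 40 1).map
    (fun j => freq.getD (j, PySem.List.pyGetD pat (PySem.Int.mod j (pat.length : Int)) 0) 0)).sum

def solution_alt (answers : List Int) : List Int :=
  let freq := buildFreq answers
  let patterns : List (List Int) :=
    [[1, 2, 3, 4, 5], [2, 1, 2, 3, 2, 4, 2, 5], [3, 3, 1, 1, 2, 2, 4, 4, 5, 5]]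
  let r := (PySem.List.enumerate patterns 1).foldl
    (fun st q =>
      let s := scoreFromFreq freq q.2
      if st.1 < s then (s, [q.1])
      else if s = st.1 then (st.1, st.2 ++ [q.1])
      else st)
    ((-1 : Int), ([] : List Int))
  r.2

-- ===== PRECONDITION & SPEC =====
def Spec_solution (answers : List Int) (out : List Int) : Prop := out = solution_alt answers
instance (answers : List Int) (out : List Int) : Decidable (Spec_solution answers out) := by unfold Spec_solution; infer_instance

-- ===== CLAIM =====
def Claim_equal_solution : Prop := ∀ (answers : List Int), Dom_solution answers → Spec_solution answers (solution answers)

-- ===== LEMMAS AND PROOFS =====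

-- A's interleaved loop is the product of three independent rotating counts
def rotCount (p : List Int) (s : Int) : List Int → Int
  | [] => s
  | x :: xs => rotCount (p.tail ++ [p.headD 0]) (if p.headD 0 = x then s + 1 else s) xs

lemma solutionLoop_eq (answers : List Int) : ∀ a b c s1 s2 s3,
    solutionLoop a b c s1 s2 s3 answers =
      (rotCount a s1 answers, rotCount b s2 answers, rotCount c s3 answers) := by
  induction answers with
  | nil => intros; rfl
  | cons x xs ih => intro a b c s1 s2 s3; simp [solutionLoop, rotCount, ih]

lemma rotCount_ge (answers : List Int) : ∀ (p : List Int) (s : Int), s ≤ rotCount p s answers := by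
  induction answers with
  | nil => intro p s; exact le_refl s
  | cons x xs ih =>
      intro p s
      refine le_trans ?_ (ih (p.tail ++ [p.headD 0]) _)
      split_ifs <;> omega

lemma rot1_rotate (p : List Int) (hp : p ≠ []) (k : Nat) :
    (p.rotate k).tail ++ [(p.rotate k).headD 0] = p.rotate (k + 1) := by
  have hne : p.rotate k ≠ [] := by simp [hp]
  rcases hl : p.rotate k with _ | ⟨x, xs⟩
  · exact absurd hl hne
  · have h1 : (x :: xs).rotate 1 = xs ++ [x] := by
      simp [List.rotate_cons_succ]
    calc xs ++ [x] = (p.rotate k).rotate 1 := by rw [hl, h1]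
      _ = p.rotate (k + 1) := by rw [List.rotate_rotate]

lemma headD_rotate (p : List Int) (hp : p ≠ []) (k : Nat) :
    (p.rotate k).headD 0 = p.getD (k % p.length) 0 := by
  have hlen : 0 < p.length := List.length_pos_of_ne_nil hp
  have h : k % p.length < p.length := Nat.mod_lt _ hlen
  rw [← List.rotate_mod]
  rw [List.rotate_eq_drop_append_take (le_of_lt h)]
  rcases hd : p.drop (k % p.length) with _ | ⟨y, ys⟩
  · simp at hd; omega
  · have h2 : p[k % p.length]? = some y := by
      have := (List.getElem?_drop (xs := p) (i := k % p.length) (j := 0)).symm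
      simpa [hd] using this
    simp [List.getD, h2]

lemma rotCount_eq_enum (p : List Int) (hp : p ≠ []) :
    ∀ (answers : List Int) (k : Nat) (s : Int),
    rotCount (p.rotate k) s answers =
      (PySem.List.enumerate answers (k : Int)).foldl
        (fun s q =>
          if PySem.List.pyGetD p (PySem.Int.mod q.1 (p.length : Int)) 0 = q.2 then s + 1 else s) s := by
  intro answers
  induction answers with
  | nil => intro k s; rfl
  | cons x xs ih =>
      intro k s
      rw [PySem.List.enumerate_cons]
      have hmod : PySem.Int.mod (k : Int) (p.length : Int) = ((k % p.length : Nat) : Int) :=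
        PySem.Int.mod_natCast k p.length
      have hget : PySem.List.pyGetD p ((k % p.length : Nat) : Int) 0 = p.getD (k % p.length) 0 :=
        PySem.List.pyGetD_natCast p _ 0
      have hcast : ((k : Int) + 1) = ((k + 1 : Nat) : Int) := by push_cast; ring
      simp only [rotCount, List.foldl_cons]
      rw [rot1_rotate p hp k, headD_rotate p hp k, hmod, hget, hcast, ih (k + 1)]

-- one histogram update bumps the 40-term lookup sum by at most one, at its own key
lemma sum_getD_insert_bump (g : Int → Int) (k0 : Int × Int) :
    ∀ (l : List Int), l.Nodup → ∀ (d : PySem.Dict (Int × Int) Int),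
    (l.map (fun j => (d.insert k0 (d.getD k0 0 + 1)).getD (j, g j) 0)).sum
      = (l.map (fun j => d.getD (j, g j) 0)).sum
        + (if k0.1 ∈ l ∧ g k0.1 = k0.2 then 1 else 0) := by
  intro l
  induction l with
  | nil => intro _ d; simp
  | cons h t ih =>
      intro hnd d
      rcases List.nodup_cons.mp hnd with ⟨hht, hndt⟩
      simp only [List.map_cons, List.sum_cons]
      rw [ih hndt d, PySem.Dict.getD_insert]
      by_cases hh : (h, g h) = k0
      · have h1 : h = k0.1 := congrArg Prod.fst hh
        have h2 : g k0.1 = k0.2 := by rw [← h1]; exact congrArg Prod.snd hh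
        have hnot : k0.1 ∉ t := h1 ▸ hht
        rw [if_pos hh, if_neg (fun hc => hnot hc.1),
            if_pos ⟨by rw [← h1]; exact List.mem_cons_self .., h2⟩, ← hh]
        ring
      · rw [if_neg hh]
        have key : (k0.1 ∈ h :: t ∧ g k0.1 = k0.2) ↔ (k0.1 ∈ t ∧ g k0.1 = k0.2) := by
          constructor
          · rintro ⟨hm, e2⟩
            rcases List.mem_cons.mp hm with e1 | e1
            · exact absurd (by rw [Prod.ext_iff]; exact ⟨e1.symm, e1 ▸ e2⟩) hh
            · exact ⟨e1, e2⟩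
          · rintro ⟨hm, e2⟩; exact ⟨List.mem_cons_of_mem _ hm, e2⟩
        rw [if_congr key rfl rfl]
        ring

lemma score_insert (pat : List Int) (hp : pat ≠ []) (hdvd : (pat.length : Int) ∣ 40)
    (d : PySem.Dict (Int × Int) Int) (k x : Int) :
    scoreFromFreq (d.insert (PySem.Int.mod k 40, x)
        (d.getD (PySem.Int.mod k 40, x) 0 + 1)) pat
      = scoreFromFreq d pat
        + (if PySem.List.pyGetD pat (PySem.Int.mod k (pat.length : Int)) 0 = x then 1 else 0) := by
  have hlen : (0 : Int) < (pat.length : Int) := by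
    have := List.length_pos_of_ne_nil hp; exact_mod_cast this
  unfold scoreFromFreq
  rw [sum_getD_insert_bump (fun j => PySem.List.pyGetD pat (PySem.Int.mod j (pat.length : Int)) 0)
    (PySem.Int.mod k 40, x) (PySem.List.pyRange 0 40 1) (PySem.List.nodup_pyRange_one 0 40) d]
  have hmem : PySem.Int.mod k 40 ∈ PySem.List.pyRange 0 40 1 := by
    rw [PySem.List.mem_pyRange_one]
    exact ⟨PySem.Int.mod_nonneg k (by norm_num), PySem.Int.mod_lt k (by norm_num)⟩
  have hmm : PySem.Int.mod (PySem.Int.mod k 40) (pat.length : Int)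
      = PySem.Int.mod k (pat.length : Int) := by
    rw [PySem.Int.mod_eq_emod_of_pos (by norm_num : (0:Int) < 40),
        PySem.Int.mod_eq_emod_of_pos hlen, PySem.Int.mod_eq_emod_of_pos hlen]
    exact Int.emod_emod_of_dvd k hdvd
  simp only [hmem, hmm, true_and]

lemma scoreFromFreq_empty (pat : List Int) : scoreFromFreq PySem.Dict.empty pat = 0 := by
  simp [scoreFromFreq, PySem.Dict.getD_empty]

lemma score_build (pat : List Int) (hp : pat ≠ []) (hdvd : (pat.length : Int) ∣ 40)
    (xs : List Int) : ∀ (k : Int) (d : PySem.Dict (Int × Int) Int),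
    scoreFromFreq ((PySem.List.enumerate xs k).foldl
        (fun d p => d.insert (PySem.Int.mod p.1 40, p.2)
          (d.getD (PySem.Int.mod p.1 40, p.2) 0 + 1)) d) pat
      = (PySem.List.enumerate xs k).foldl
          (fun s q =>
            if PySem.List.pyGetD pat (PySem.Int.mod q.1 (pat.length : Int)) 0 = q.2
            then s + 1 else s)
          (scoreFromFreq d pat) := by
  induction xs with
  | nil => intro k d; rfl
  | cons x t ih =>
      intro k d
      rw [PySem.List.enumerate_cons]
      simp only [List.foldl_cons]
      rw [ih (k + 1)]
      have : scoreFromFreq (d.insert (PySem.Int.mod k 40, x)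
          (d.getD (PySem.Int.mod k 40, x) 0 + 1)) pat
          = if PySem.List.pyGetD pat (PySem.Int.mod k (pat.length : Int)) 0 = x
            then scoreFromFreq d pat + 1 else scoreFromFreq d pat := by
        rw [score_insert pat hp hdvd d k x]; split_ifs <;> ring
      rw [this]

lemma insertBy_nil' {α : Type} (before : α → α → Bool) (x : α) :
    PySem.List.insertBy before x [] = [x] := by
  rw [PySem.List.insertBy.eq_def]

lemma insertBy_cons' {α : Type} (before : α → α → Bool) (x y : α) (ys : List α) :
    PySem.List.insertBy before x (y :: ys) =
      if before x y then x :: y :: ys else y :: PySem.List.insertBy before x ys := by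
  rw [PySem.List.insertBy.eq_def]

set_option maxHeartbeats 2000000 in
lemma final_eq (s1 s2 s3 : Int) (h1 : 0 ≤ s1) (h2 : 0 ≤ s2) (h3 : 0 ≤ s3) :
    (let score : List (Int × Int) := [(1, s1), (2, s2), (3, s3)]
     let score := PySem.List.sorted score (fun x => x.2) true
     let maxScore := (PySem.List.pyGetD score 0 (0, 0)).2
     (PySem.List.pyGetD score 0 (0, 0)).1 ::
       solutionCollect score maxScore (PySem.List.pyRange 1 (score.length : Int) 1)) =
    ((fun (st : Int × List Int) (q : Int × Int) =>
        if st.1 < q.2 then (q.2, [q.1])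
        else if q.2 = st.1 then (st.1, st.2 ++ [q.1]) else st)
      ((fun (st : Int × List Int) (q : Int × Int) =>
        if st.1 < q.2 then (q.2, [q.1])
        else if q.2 = st.1 then (st.1, st.2 ++ [q.1]) else st)
       ((fun (st : Int × List Int) (q : Int × Int) =>
        if st.1 < q.2 then (q.2, [q.1])
        else if q.2 = st.1 then (st.1, st.2 ++ [q.1]) else st)
        ((-1 : Int), ([] : List Int)) (1, s1)) (2, s2)) (3, s3)).2 := by
  have hr : PySem.List.pyRange 1 3 1 = [(1 : Int), 2] := by decide
  have t1 : (-1 : Int) < s1 := by omega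
  simp only [PySem.List.sorted_rev_eq_foldl_insertBy, List.foldl_cons, List.foldl_nil,
    insertBy_cons', insertBy_nil']
  split_ifs <;>
    simp only [decide_eq_true_eq, not_lt] at * <;>
    (try omega) <;>
    (try simp_all [insertBy_cons', insertBy_nil', solutionCollect, PySem.List.pyGetD,
      PySem.List.pyGet?, PySem.List.pyIdx?, List.getD, hr]) <;>
    (try split_ifs) <;>
    (try simp_all) <;>
    (try simp [solutionCollect, PySem.List.pyGetD, PySem.List.pyGet?, PySem.List.pyIdx?,
      List.getD]) <;>
    (try split_ifs) <;>
    (try simp_all) <;>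
    (try omega)

-- ===== VERDICT (by name: the statement is the Claim_ definition above) =====
theorem solution_spec : Claim_equal_solution := by
  intro answers _
  unfold Spec_solution solution solution_alt buildFreq
  rw [solutionLoop_eq]
  have e1 := rotCount_eq_enum [1, 2, 3, 4, 5] (by simp) answers 0 0
  have e2 := rotCount_eq_enum [2, 1, 2, 3, 2, 4, 2, 5] (by simp) answers 0 0
  have e3 := rotCount_eq_enum [3, 3, 1, 1, 2, 2, 4, 4, 5, 5] (by simp) answers 0 0
  simp only [List.rotate_zero, Nat.cast_zero] at e1 e2 e3
  have n1 := rotCount_ge answers [1, 2, 3, 4, 5] 0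
  have n2 := rotCount_ge answers [2, 1, 2, 3, 2, 4, 2, 5] 0
  have n3 := rotCount_ge answers [3, 3, 1, 1, 2, 2, 4, 4, 5, 5] 0
  have g1 := score_build [1, 2, 3, 4, 5] (by simp) (by norm_num) answers 0 PySem.Dict.empty
  have g2 := score_build [2, 1, 2, 3, 2, 4, 2, 5] (by simp) (by norm_num) answers 0 PySem.Dict.empty
  have g3 := score_build [3, 3, 1, 1, 2, 2, 4, 4, 5, 5] (by simp) (by norm_num) answers 0 PySem.Dict.empty
  rw [scoreFromFreq_empty] at g1 g2 g3
  simp only [PySem.List.enumerate_cons, PySem.List.enumerate_nil, List.foldl_cons, List.foldl_nil]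
  rw [g1, g2, g3, ← e1, ← e2, ← e3]
  revert n1 n2 n3
  generalize rotCount [1, 2, 3, 4, 5] 0 answers = s1
  generalize rotCount [2, 1, 2, 3, 2, 4, 2, 5] 0 answers = s2
  generalize rotCount [3, 3, 1, 1, 2, 2, 4, 4, 5, 5] 0 answers = s3
  intro n1 n2 n3
  exact final_eq s1 s2 s3 n1 n2 n3
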